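-- pv_equiv track=rewrite | github.com/sqlqm/PharmaLedger | predict_transit_time.py | is_continuous_route
-- ===== SOURCE A (Python) =====
-- def is_continuous_route(location_list):
--     visited = set()
--     last_loc = None
--     for loc in location_list:
--         if last_loc is not None and loc != last_loc:
--             if loc in visited:
--                 return False
--         visited.add(loc)
--         last_loc = loc
--     return True
-- ===== SOURCE B (Python) =====
-- def is_continuous_route(location_list):
--     collapsed = []
--     prev = None
--     for loc in location_list:
--         if prev is None or loc != prev:
--             collapsed.append(loc)
--         prev = loc
--     return len(collapsed) == len(set(collapsed))
-- ===== Notes on version B (the rewrite author's own statement) =====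
-- stated objective: simpler
-- what changed: Replaces the incremental visited-set with in-loop early return by a build-then-count decomposition: first collapse consecutive duplicate locations into run representatives, then declare the route continuous iff the collapsed list has no repeats (len == len(set)).
import Mathlib
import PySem

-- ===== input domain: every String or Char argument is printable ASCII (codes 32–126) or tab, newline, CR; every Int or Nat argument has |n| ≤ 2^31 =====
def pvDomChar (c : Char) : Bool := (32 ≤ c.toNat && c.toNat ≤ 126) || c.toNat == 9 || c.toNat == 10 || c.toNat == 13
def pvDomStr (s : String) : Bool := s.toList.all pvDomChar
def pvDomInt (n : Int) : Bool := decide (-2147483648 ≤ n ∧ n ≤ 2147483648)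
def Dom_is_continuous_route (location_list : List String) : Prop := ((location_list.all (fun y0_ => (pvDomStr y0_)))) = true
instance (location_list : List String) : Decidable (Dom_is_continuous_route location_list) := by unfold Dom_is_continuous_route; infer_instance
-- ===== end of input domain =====

-- B replaces A's incremental visited-set with early return by a build-then-count
-- decomposition (collapse consecutive duplicates, then compare len with len(set)); objective: simpler.

-- ===== PORT A =====
-- the for-loop of A, with its state (visited, last_loc); 'return False' = result false
def isContinuousGoA (V : PySem.Set String) (last : Option String) : List String → Bool
  | [] => true
  | loc :: rest =>
    if last ≠ none ∧ some loc ≠ last then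
      if PySem.Set.contains V loc then false
      else isContinuousGoA (PySem.Set.add V loc) (some loc) rest
    else isContinuousGoA (PySem.Set.add V loc) (some loc) rest

def is_continuous_route (location_list : List String) : Bool :=
  isContinuousGoA PySem.Set.empty none location_list

-- ===== PORT B =====
-- one step of B's loop over state (collapsed, prev)
def collapseStep (s : List String × Option String) (loc : String) : List String × Option String :=
  (if s.2 = none ∨ some loc ≠ s.2 then s.1 ++ [loc] else s.1, some loc)

def is_continuous_route_alt (location_list : List String) : Bool :=
  let collapsed := (location_list.foldl collapseStep ([], none)).1
  collapsed.length == (PySem.Set.ofList collapsed).length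

-- ===== PRECONDITION & SPEC =====
def Spec_is_continuous_route (location_list : List String) (out : Bool) : Prop := out = is_continuous_route_alt location_list
instance (location_list : List String) (out : Bool) : Decidable (Spec_is_continuous_route location_list out) := by unfold Spec_is_continuous_route; infer_instance

-- ===== CLAIM (what is proved, stated in full; the proofs are below) =====
def Claim_equal_is_continuous_route : Prop := ∀ (location_list : List String), Dom_is_continuous_route location_list → Spec_is_continuous_route location_list (is_continuous_route location_list)

-- ===== LEMMAS AND PROOFS =====

-- run-collapse relative to a known previous element (proof-side characterisation)
def collapseFrom (p : String) : List String → List String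
  | [] => []
  | x :: xs => if x = p then collapseFrom p xs else x :: collapseFrom x xs

theorem fst_foldl_collapseStep (xs : List String) : ∀ (acc : List String) (p : String),
    (xs.foldl collapseStep (acc, some p)).1 = acc ++ collapseFrom p xs := by
  induction xs with
  | nil => intro acc p; simp [collapseFrom]
  | cons x xs ih =>
    intro acc p
    by_cases h : x = p
    · subst h
      simp [List.foldl_cons, collapseStep, collapseFrom, ih]
    · simp [List.foldl_cons, collapseStep, collapseFrom, h, ih]

theorem mem_set_add (s : PySem.Set String) (x y : String) :
    y ∈ PySem.Set.add s x ↔ y ∈ s ∨ y = x := PySem.Set.mem_add s x y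

theorem set_contains_eq (s : PySem.Set String) (x : String) :
    PySem.Set.contains s x = decide (x ∈ s) := by
  by_cases h : x ∈ s
  · simp [PySem.Set.contains_iff, h]
  · simp only [h, decide_false]
    exact Bool.not_eq_true _ ▸ (fun hc => h ((PySem.Set.contains_iff s x).1 hc))

theorem set_add_self (s : PySem.Set String) (x : String) (h : x ∈ s) :
    PySem.Set.add s x = s := by
  simp [PySem.Set.add, h]

theorem goA_eq_decide (xs : List String) : ∀ (V : PySem.Set String) (p : String), p ∈ V →
    isContinuousGoA V (some p) xs
      = decide ((collapseFrom p xs).Nodup ∧ ∀ y ∈ collapseFrom p xs, y ∉ V) := by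
  induction xs with
  | nil => intro V p _; simp [isContinuousGoA, collapseFrom]
  | cons x xs ih =>
    intro V p hp
    by_cases h : x = p
    · subst h
      rw [show isContinuousGoA V (some x) (x :: xs)
            = isContinuousGoA (PySem.Set.add V x) (some x) xs by simp [isContinuousGoA]]
      rw [set_add_self V x hp, ih V x hp]
      simp [collapseFrom]
    · by_cases hv : x ∈ V
      · rw [show isContinuousGoA V (some p) (x :: xs) = false by
              simp [isContinuousGoA, h, set_contains_eq, hv]]
        have hcon : ¬((collapseFrom p (x :: xs)).Nodup ∧
            ∀ y ∈ collapseFrom p (x :: xs), y ∉ V) := by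
          simp only [collapseFrom, if_neg h]
          exact fun ⟨_, hall⟩ => (hall x (by simp)) hv
        simp [hcon]
      · rw [show isContinuousGoA V (some p) (x :: xs)
              = isContinuousGoA (PySem.Set.add V x) (some x) xs by
              simp [isContinuousGoA, h, set_contains_eq, hv]]
        rw [ih (PySem.Set.add V x) x (by simp [PySem.Set.mem_add])]
        simp only [collapseFrom, if_neg h, List.nodup_cons, List.mem_cons, decide_eq_decide]
        constructor
        · rintro ⟨hnd, hall⟩
          refine ⟨⟨fun hx => ?_, hnd⟩, fun y hy => ?_⟩
          · exact (hall x hx) (by simp [PySem.Set.mem_add])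
          · rcases hy with rfl | hy
            · exact hv
            · exact fun hyV => (hall y hy) (by simp [PySem.Set.mem_add, hyV])
        · rintro ⟨⟨hxn, hnd⟩, hall⟩
          refine ⟨hnd, fun y hy hyadd => ?_⟩
          rcases (mem_set_add V x y).1 hyadd with hyV | rfl
          · exact (hall y (Or.inr hy)) hyV
          · exact hxn hy

theorem ofList_sublist (l : List String) : List.Sublist (PySem.Set.ofList l) l := by
  induction l with
  | nil => simp [PySem.Set.ofList_nil]
  | cons x xs ih =>
    rw [PySem.Set.ofList_cons]
    refine List.Sublist.cons₂ x (List.Sublist.trans ?_ ih)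
    simp only [PySem.Set.discard]
    exact List.filter_sublist

theorem length_ofList_eq_iff_nodup (l : List String) :
    ((PySem.Set.ofList l).length = l.length) ↔ l.Nodup := by
  constructor
  · intro h
    have := (ofList_sublist l).eq_of_length h
    rw [← this]; exact PySem.Set.nodup_ofList l
  · intro h; rw [PySem.Set.ofList_eq_self_of_nodup l h]

theorem alt_eq_decide (xs : List String) :
    is_continuous_route_alt xs
      = decide ((xs.foldl collapseStep ([], none)).1.Nodup) := by
  simp only [is_continuous_route_alt]
  rw [Bool.eq_iff_iff]
  simp only [beq_iff_eq, decide_eq_true_eq]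
  rw [eq_comm]
  exact length_ofList_eq_iff_nodup _

-- ===== VERDICT (by name: the statement is the Claim_ definition above) =====
theorem is_continuous_route_spec : Claim_equal_is_continuous_route := by
  intro xs _
  unfold Spec_is_continuous_route
  cases xs with
  | nil => rfl
  | cons x xs =>
    rw [alt_eq_decide]
    rw [show (((x :: xs).foldl collapseStep ([], none)).1)
          = x :: collapseFrom x xs by
          simp [List.foldl_cons, collapseStep, fst_foldl_collapseStep]]
    rw [show is_continuous_route (x :: xs)
          = isContinuousGoA (PySem.Set.add PySem.Set.empty x) (some x) xs by
          simp [is_continuous_route, isContinuousGoA]]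
    rw [goA_eq_decide xs _ x (by simp [PySem.Set.add, PySem.Set.empty])]
    simp [List.nodup_cons, PySem.Set.add, PySem.Set.empty]
    rw [Bool.eq_iff_iff]
    simp only [Bool.and_eq_true, Bool.not_eq_true', decide_eq_true_eq,
               decide_eq_false_iff_not]
    constructor
    · rintro ⟨hnd, hall⟩; exact ⟨fun h => (hall x h) rfl, hnd⟩
    · rintro ⟨hx, hnd⟩; exact ⟨hnd, fun y hy hyx => hx (hyx ▸ hy)⟩
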